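-- pv_equiv track=rewrite | github.com/robertmuth/Cwerg | FrontEnd/typify.py | ComputeStringSize
-- ===== SOURCE A (Python) =====
-- def ComputeStringSize(strkind: str, string: str) -> int:
--     n = len(string)
--     if strkind == "raw":
--         return n
--     if strkind == "hex":
--         n = 0
--         last = None
--         for c in string:
--             if c in " \t\n":
--                 continue
--             if last:
--                 last = None
--             else:
--                 last = c
--                 n += 1
--         assert last is None
--         return n
--     esc = False
--     for c in string:
--         if esc:
--             esc = False
--             if c == "x":
--                 n -= 3
--             else:
--                 n -= 1
--         elif c == "\\":
--             esc = True
--     return n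
-- ===== SOURCE B (Python) =====
-- def ComputeStringSize(strkind: str, string: str) -> int:
--     if strkind == "raw":
--         return len(string)
--     if strkind == "hex":
--         digits = len(string) - sum(string.count(w) for w in " \t\n")
--         assert digits % 2 == 0
--         return digits // 2
--     # escape branch: sum per-token byte contributions instead of subtracting from len
--     total = 0
--     it = iter(string)
--     for c in it:
--         if c == "\\":
--             nxt = next(it, None)
--             if nxt is None:
--                 total += 1
--             else:
--                 total += -1 if nxt == "x" else 1
--         else:
--             total += 1
--     return total
-- ===== Notes on version B (the rewrite author's own statement) =====
-- stated objective: alternative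
-- what changed: hex branch counts each whitespace kind with str.count and subtracts from len (staged passes, closed-form halving) instead of a pairing toggle; escape branch sums per-token byte contributions (+1 per char or escape, -1 for a hex escape) over an iterator consuming both characters of an escape at once, instead of decrementing a running length behind an esc flag
import Mathlib
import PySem

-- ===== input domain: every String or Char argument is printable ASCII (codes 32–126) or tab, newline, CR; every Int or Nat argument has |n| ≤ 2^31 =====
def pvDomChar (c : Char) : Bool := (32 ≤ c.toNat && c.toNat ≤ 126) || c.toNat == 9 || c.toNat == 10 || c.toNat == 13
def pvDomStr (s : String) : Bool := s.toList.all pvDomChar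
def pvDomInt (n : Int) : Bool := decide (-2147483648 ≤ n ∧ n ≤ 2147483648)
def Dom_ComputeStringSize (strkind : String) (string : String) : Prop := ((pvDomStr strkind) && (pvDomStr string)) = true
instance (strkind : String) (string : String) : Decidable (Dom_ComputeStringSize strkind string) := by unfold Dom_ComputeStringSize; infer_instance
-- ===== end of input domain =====

-- B: hex branch = len minus one str.count per whitespace kind, then closed-form halving;
-- escape branch = sum of per-token byte contributions over token-at-a-time recursion
-- (alternative decomposition, same O(n) cost; return value only).


-- ===== PORT A =====
-- the whitespace characters of Python's `c in " \t\n"` test (single-char membership)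
def pvHexWs : List Char := [' ', '\t', '\n']

def ComputeStringSize (strkind : String) (string : String) : Int :=
  let n : Int := (string.toList.length : Int)
  if strkind = "raw" then n
  else if strkind = "hex" then
    let st := string.toList.foldl (fun (st : Int × Option Char) c =>
      if c ∈ pvHexWs then st
      else match st.2 with
        | some _ => (st.1, none)
        | none   => (st.1 + 1, some c)) (0, none)
    -- Python's `assert last is None` raises exactly when st.2 ≠ none; Pre_ excludes those inputs
    st.1
  else
    (string.toList.foldl (fun (st : Bool × Int) c =>
      if st.1 then (false, st.2 - (if c = 'x' then 3 else 1))
      else if c = '\\' then (true, st.2) else st) (false, n)).2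

-- ===== PORT B =====
-- Source B's escape-branch loop: the iterator consumes a whole escape (backslash + next char)
-- per step and adds that token's byte contribution
def tokSum : List Char → Int
  | [] => 0
  | c :: r =>
    if c = '\\' then
      match r with
      | [] => 1
      | d :: r' => (if d = 'x' then -1 else 1) + tokSum r'
    else 1 + tokSum r

def ComputeStringSize_alt (strkind : String) (string : String) : Int :=
  if strkind = "raw" then (string.toList.length : Int)
  else if strkind = "hex" then
    let l := string.toList
    let digits : Int := (l.length : Int) -
      ((l.count ' ' : Int) + (l.count '\t' : Int) + (l.count '\n' : Int))
    -- Python's `assert digits % 2 == 0` raises exactly outside Pre_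
    PySem.Int.floordiv digits 2
  else tokSum string.toList

-- ===== PRECONDITION & SPEC =====
-- Pre_ excludes exactly the inputs where A (and B alike) raises AssertionError:
-- strkind "hex" with an odd number of non-whitespace characters.
def Pre_ComputeStringSize (strkind : String) (string : String) : Prop :=
  strkind = "hex" → (string.toList.countP (fun c => decide (c ∉ pvHexWs))) % 2 = 0
instance (strkind : String) (string : String) : Decidable (Pre_ComputeStringSize strkind string) := by
  unfold Pre_ComputeStringSize; infer_instance

def pvWitness_ComputeStringSize : String × String := ("hex", "ab c1")

def Spec_ComputeStringSize (strkind : String) (string : String) (out : Int) : Prop := out = ComputeStringSize_alt strkind string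
instance (strkind : String) (string : String) (out : Int) : Decidable (Spec_ComputeStringSize strkind string out) := by unfold Spec_ComputeStringSize; infer_instance

-- ===== CLAIM (what is proved, stated in full; the proofs are below) =====
def Claim_equal_ComputeStringSize : Prop := ∀ (strkind : String) (string : String), Dom_ComputeStringSize strkind string → Pre_ComputeStringSize strkind string → Spec_ComputeStringSize strkind string (ComputeStringSize strkind string)

-- ===== LEMMAS AND PROOFS =====

-- A's hex fold, as structural recursion (second component: whether `last` is some)
def hexF : List Char → Int → Bool → Int × Bool
  | [], n, b => (n, b)
  | c :: r, n, b =>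
    if c ∈ pvHexWs then hexF r n b
    else if b then hexF r n false else hexF r (n + 1) true

theorem hexF_eq_foldl (l : List Char) (n : Int) (o : Option Char) :
    (l.foldl (fun (st : Int × Option Char) c =>
      if c ∈ pvHexWs then st
      else match st.2 with
        | some _ => (st.1, none)
        | none   => (st.1 + 1, some c)) (n, o)).1 = (hexF l n o.isSome).1 := by
  induction l generalizing n o with
  | nil => simp [hexF]
  | cons c r ih =>
    by_cases hc : c ∈ pvHexWs
    · simp [hexF, hc, ih]
    · cases o <;> simp [hexF, hc, ih, List.foldl_cons]

theorem hexF_val (l : List Char) (n : Int) (b : Bool) :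
    (hexF l n b).1 = n + (if b then ((l.countP (fun c => decide (c ∉ pvHexWs))) / 2 : Nat)
                          else (((l.countP (fun c => decide (c ∉ pvHexWs))) + 1) / 2 : Nat)) := by
  induction l generalizing n b with
  | nil => cases b <;> simp [hexF]
  | cons c r ih =>
    by_cases hc : c ∈ pvHexWs
    · simp [hexF, hc, ih]
    · cases b <;> (simp [hexF, hc, ih]; try omega)

-- non-whitespace count = length minus the three per-character counts
theorem countP_non_ws (l : List Char) :
    l.countP (fun c => decide (c ∉ pvHexWs)) + (l.count ' ' + l.count '\t' + l.count '\n')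
      = l.length := by
  induction l with
  | nil => simp
  | cons c r ih =>
    simp only [List.countP_cons, List.count_cons, List.length_cons]
    by_cases h1 : c = ' '
    · subst h1; simp [pvHexWs] at ih ⊢; omega
    · by_cases h2 : c = '\t'
      · subst h2; simp [pvHexWs] at ih ⊢; omega
      · by_cases h3 : c = '\n'
        · subst h3; simp [pvHexWs] at ih ⊢; omega
        · simp [pvHexWs, h1, h2, h3] at ih ⊢; omega

-- A's escape fold, as structural recursion on the remaining characters
def escF : Bool → List Char → Int → Int
  | _, [], n => n
  | true, c :: r, n => escF false r (n - (if c = 'x' then 3 else 1))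
  | false, c :: r, n => if c = '\\' then escF true r n else escF false r n

theorem escF_eq_foldl (l : List Char) (b : Bool) (n : Int) :
    (l.foldl (fun (st : Bool × Int) c =>
      if st.1 then (false, st.2 - (if c = 'x' then 3 else 1))
      else if c = '\\' then (true, st.2) else st) (b, n)).2 = escF b l n := by
  induction l generalizing b n with
  | nil => simp [escF]
  | cons c r ih =>
    cases b <;> by_cases hc : c = '\\' <;> simp [escF, hc, ih, List.foldl_cons]

-- A's length-minus-deductions loop equals B's token-contribution sum
theorem escF_eq_tokSum (l : List Char) (n : Int) :
    escF false l n = n - (l.length : Int) + tokSum l := by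
  induction l using tokSum.induct generalizing n with
  | case1 => simp [escF, tokSum]
  | case2 =>
    have h1 : escF false ['\\'] n = n := by simp [escF]
    have h2 : tokSum ['\\'] = 1 := by simp [tokSum]
    rw [h1, h2]; simp
  | case3 d r' ih =>
    have h1 : escF false ('\\' :: d :: r') n
        = escF false r' (n - (if d = 'x' then 3 else 1)) := by simp [escF]
    have h2 : tokSum ('\\' :: d :: r') = (if d = 'x' then -1 else 1) + tokSum r' := by
      simp [tokSum]
    rw [h1, ih, h2]
    by_cases hd : d = 'x' <;> simp [hd, List.length_cons] <;> push_cast <;> omega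
  | case4 d r' hd ih =>
    have h1 : escF false (d :: r') n = escF false r' n := by simp [escF, hd]
    have h2 : tokSum (d :: r') = 1 + tokSum r' := by rw [tokSum.eq_def]; simp [hd]
    rw [h1, ih, h2]
    simp only [List.length_cons]
    push_cast
    omega

-- ===== VERDICT (by name: the statement is the Claim_ definition above) =====
theorem ComputeStringSize_spec : Claim_equal_ComputeStringSize := by
  intro strkind string _ hpre
  unfold Spec_ComputeStringSize ComputeStringSize ComputeStringSize_alt
  by_cases hraw : strkind = "raw"
  · simp [hraw]
  · by_cases hhex : strkind = "hex"
    · have hk := hpre hhex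
      subst hhex
      simp only [String.reduceEq, reduceIte]
      rw [hexF_eq_foldl, hexF_val]
      simp only [Option.isSome_none, Bool.false_eq_true, if_false]
      have hcnt := countP_non_ws string.toList
      set cnt := string.toList.countP (fun c => decide (c ∉ pvHexWs)) with hc
      have hdig : ((string.toList.length : Int) -
          ((string.toList.count ' ' : Int) + (string.toList.count '\t' : Int) +
            (string.toList.count '\n' : Int))) = (cnt : Int) := by
        push_cast
        omega
      rw [hdig, PySem.Int.floordiv_eq_ediv_of_pos (by omega)]
      omega
    · simp only [hraw, hhex, if_false]
      rw [escF_eq_foldl, escF_eq_tokSum]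
      simp
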